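-- pv_equiv track=rewrite | github.com/pnjha/database_a3 | 2018201013_1.py | all_output_executed
-- ===== SOURCE A (Python) =====
-- def all_output_executed(instruction,transaction_dict,transaction_id):
--
-- 	all_instuction_list = transaction_dict[transaction_id]
--
-- 	check_flag = False
-- 	counter = 1
--
-- 	for inst in all_instuction_list:
--
-- 		if inst == instruction:
-- 			check_flag = True
-- 			if counter == len(all_instuction_list):
-- 				return True
--
--
-- 		counter += 1
-- 	return False
-- ===== SOURCE B (Python) =====
-- def all_output_executed(instruction, transaction_dict, transaction_id):
--     lst = transaction_dict[transaction_id]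
--     return bool(lst) and lst[-1] == instruction
-- ===== Notes on version B (the rewrite author's own statement) =====
-- stated objective: faster
-- what changed: Replaces the full scan with a manual 1-based counter by a direct O(1) check that the list is nonempty and its last element equals the instruction (A returns True only when the match occurs at the final position).
-- outside the precondition, e.g. on all_output_executed('x', {}, 'missing'): A raises KeyError, B raises KeyError
import Mathlib
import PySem

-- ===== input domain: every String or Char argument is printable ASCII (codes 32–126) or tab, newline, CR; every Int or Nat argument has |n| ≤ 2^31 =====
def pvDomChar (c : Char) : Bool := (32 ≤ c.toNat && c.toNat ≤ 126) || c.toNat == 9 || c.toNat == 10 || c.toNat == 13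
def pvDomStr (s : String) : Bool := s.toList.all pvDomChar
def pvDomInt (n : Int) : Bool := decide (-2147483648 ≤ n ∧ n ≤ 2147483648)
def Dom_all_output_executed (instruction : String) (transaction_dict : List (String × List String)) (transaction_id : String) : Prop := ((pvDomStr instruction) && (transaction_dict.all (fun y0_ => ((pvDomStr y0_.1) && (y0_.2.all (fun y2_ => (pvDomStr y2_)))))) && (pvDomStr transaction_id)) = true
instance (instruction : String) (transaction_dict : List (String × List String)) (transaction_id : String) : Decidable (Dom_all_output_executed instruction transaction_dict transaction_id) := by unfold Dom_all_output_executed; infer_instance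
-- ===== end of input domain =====

-- B replaces A's counter-driven scan by an O(1) check of the list's last element; equal on all inputs where the lookup succeeds.

-- ===== PORT A =====
-- the for-loop of A: state = (remaining list, counter, check_flag); branches in source order
def pvALoop (instruction : String) (n : Int) : List String → Int → Bool → Bool
  | [], _, _ => false
  | inst :: rest, counter, flag =>
    if inst = instruction then
      (if counter = n then true else pvALoop instruction n rest (counter + 1) true)
    else
      pvALoop instruction n rest (counter + 1) flag

def all_output_executed (instruction : String) (transaction_dict : List (String × List String)) (transaction_id : String) : Bool :=
  match transaction_dict.lookup transaction_id with
  | none => false   -- KeyError in Python; excluded by Pre_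
  | some all_instuction_list =>
      pvALoop instruction (all_instuction_list.length : Int) all_instuction_list 1 false

-- ===== PORT B =====
def all_output_executed_alt (instruction : String) (transaction_dict : List (String × List String)) (transaction_id : String) : Bool :=
  match transaction_dict.lookup transaction_id with
  | none => false   -- KeyError in Python; excluded by Pre_
  | some lst => !lst.isEmpty && (PySem.List.pyGet? lst (-1) == some instruction)

-- ===== PRECONDITION & SPEC =====
-- Pre_ excludes exactly the inputs where transaction_id is not a key of transaction_dict: there both A and B raise KeyError.
def Pre_all_output_executed (instruction : String) (transaction_dict : List (String × List String)) (transaction_id : String) : Prop :=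
  transaction_id ∈ transaction_dict.map Prod.fst
instance (instruction : String) (transaction_dict : List (String × List String)) (transaction_id : String) : Decidable (Pre_all_output_executed instruction transaction_dict transaction_id) := by unfold Pre_all_output_executed; infer_instance

def pvWitness_all_output_executed : String × (List (String × List String)) × String :=
  ("w", [("t1", ["r", "w"])], "t1")

def Spec_all_output_executed (instruction : String) (transaction_dict : List (String × List String)) (transaction_id : String) (out : Bool) : Prop := out = all_output_executed_alt instruction transaction_dict transaction_id
instance (instruction : String) (transaction_dict : List (String × List String)) (transaction_id : String) (out : Bool) : Decidable (Spec_all_output_executed instruction transaction_dict transaction_id out) := by unfold Spec_all_output_executed; infer_instance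

-- ===== CLAIM (what is proved, stated in full; the proofs are below) =====
def Claim_equal_all_output_executed : Prop := ∀ (instruction : String) (transaction_dict : List (String × List String)) (transaction_id : String), Dom_all_output_executed instruction transaction_dict transaction_id → Pre_all_output_executed instruction transaction_dict transaction_id → Spec_all_output_executed instruction transaction_dict transaction_id (all_output_executed instruction transaction_dict transaction_id)

-- ===== LEMMAS AND PROOFS =====

-- getLast? skips the head of a cons with nonempty tail
theorem pvGetLast?_cons {x : String} {rest : List String} (h : rest ≠ []) :
    (x :: rest).getLast? = rest.getLast? := by
  cases rest with
  | nil => exact absurd rfl h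
  | cons y ys => simp [List.getLast?_cons_cons]

-- the scan returns true iff the last element equals instruction, provided the counter is in step with the tail
theorem pvALoop_char (instruction : String) (n : Int) :
    ∀ (xs : List String) (c : Int) (flag : Bool), c + xs.length = n + 1 →
      pvALoop instruction n xs c flag = (xs.getLast? == some instruction) := by
  intro xs
  induction xs with
  | nil => intro c flag _; simp [pvALoop]
  | cons x rest ih =>
    intro c flag h
    simp only [List.length_cons] at h
    by_cases hx : x = instruction
    · by_cases hrest : rest = []
      · subst hrest
        have hc : c = n := by simp at h; omega
        simp [pvALoop, hx, hc]
      · have hc : c ≠ n := by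
          intro hcn
          have : (rest.length : Int) = 0 := by omega
          simp [List.length_eq_zero_iff] at this
          exact hrest this
        rw [pvALoop, if_pos hx, if_neg hc, ih (c + 1) true (by omega),
            pvGetLast?_cons hrest]
    · by_cases hrest : rest = []
      · subst hrest
        simp [pvALoop, hx]
      · rw [pvALoop, if_neg hx, ih (c + 1) flag (by omega),
          pvGetLast?_cons hrest]

theorem pvLast_eq (instruction : String) (lst : List String) :
    (lst.getLast? == some instruction) = (!lst.isEmpty && (PySem.List.pyGet? lst (-1) == some instruction)) := by
  cases lst with
  | nil => simp [PySem.List.pyGet?_neg_one]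
  | cons x rest => simp [PySem.List.pyGet?_neg_one]

-- ===== VERDICT (by name: the statement is the Claim_ definition above) =====
theorem all_output_executed_spec : Claim_equal_all_output_executed := by
  intro instruction transaction_dict transaction_id _ _
  unfold Spec_all_output_executed all_output_executed all_output_executed_alt
  cases transaction_dict.lookup transaction_id with
  | none => rfl
  | some lst =>
    show pvALoop instruction (lst.length : Int) lst 1 false
        = (!lst.isEmpty && (PySem.List.pyGet? lst (-1) == some instruction))
    rw [pvALoop_char instruction (lst.length : Int) lst 1 false (by omega), pvLast_eq]
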